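-- pv_equiv track=rewrite | github.com/doyedele1/algo-series | Amazon OA/Minimum Groups/solution.py | minimumGroups
-- ===== SOURCE A (Python) =====
-- def minimumGroups(arr, k):
--     arr.sort()
--     start = 0
--     if len(arr) == 0: return 0
--
--     count = 1
--     for i in range(len(arr)):
--         if (arr[i] - arr[start]) > k:
--             count += 1
--             start = i
--     return count
-- ===== SOURCE B (Python) =====
-- def minimumGroups(arr, k):
--     arr.sort()
--     return _groups(arr, k)
--
-- def _groups(xs, k):
--     # count groups recursively: the first (smallest) element anchors a group
--     # that absorbs every element within k of it; recurse on the rest.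
--     if not xs:
--         return 0
--     rest = [x for x in xs[1:] if x - xs[0] > k]
--     return 1 + _groups(rest, k)
-- ===== Notes on version B (the rewrite author's own statement) =====
-- stated objective: alternative
-- what changed: Replaces A's index loop with a running start pointer by a recursive group decomposition: peel off the smallest element as the group anchor and recurse on the filtered remainder beyond anchor+k.
-- intended difference: For negative k on a nonempty list, A's self-comparison arr[0]-arr[0] > k fires on every index, so A returns len(arr)+1 groups; B returns len(arr) (each element its own group), which is the intended count since a group can never exceed the number of elements. — e.g. on minimumGroups([0], -1): A returns 2, B returns 1
import Mathlib
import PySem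

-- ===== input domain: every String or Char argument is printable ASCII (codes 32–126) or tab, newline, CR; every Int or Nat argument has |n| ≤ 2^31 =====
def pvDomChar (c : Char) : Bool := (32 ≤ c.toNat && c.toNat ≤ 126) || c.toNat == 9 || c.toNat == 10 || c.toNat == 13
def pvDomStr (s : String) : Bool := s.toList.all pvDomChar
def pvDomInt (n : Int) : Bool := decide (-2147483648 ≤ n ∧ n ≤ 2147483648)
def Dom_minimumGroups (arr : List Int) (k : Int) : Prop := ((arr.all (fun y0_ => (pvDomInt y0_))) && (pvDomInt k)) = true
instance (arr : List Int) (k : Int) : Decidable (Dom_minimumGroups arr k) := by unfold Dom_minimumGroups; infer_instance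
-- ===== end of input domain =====

-- B replaces A's index loop (running start index) by a recursive group decomposition
-- (peel the smallest element as anchor, recurse on the elements beyond anchor+k); objective: alternative.
-- A sorts arr in place; the equivalence proved here is about the RETURN value only (B performs the same mutation).

-- ===== PORT A =====
def minimumGroups (arr : List Int) (k : Int) : Int :=
  -- arr.sort()
  let s := PySem.List.sorted arr (fun x => x) false
  -- if len(arr) == 0: return 0
  if s.length = 0 then 0
  else
    -- count = 1; for i in range(len(arr)): if arr[i] - arr[start] > k: count += 1; start = i
    ((List.range s.length).foldl
      (fun (q : Int × Nat) i =>
        if s.getD i 0 - s.getD q.2 0 > k then (q.1 + 1, i) else q)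
      (1, 0)).1

-- ===== PORT B =====
-- _groups in Source B: recursion on the sorted list, filtering each tail past the anchor.
-- fuel = list length is only a totality device (each recursive call strictly shrinks the list).
def altGroups (k : Int) : Nat → List Int → Int
  | _, [] => 0
  | 0, _ :: _ => 0  -- unreachable: fuel starts at the list length and filter never grows a list
  | n + 1, a :: xs => 1 + altGroups k n (xs.filter (fun x => decide (x - a > k)))

def minimumGroups_alt (arr : List Int) (k : Int) : Int :=
  -- arr.sort(); return _groups(arr, k)
  let s := PySem.List.sorted arr (fun x => x) false
  altGroups k s.length s

-- ===== PRECONDITION & SPEC =====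
-- For negative k on a nonempty list, A's self-comparison arr[i]-arr[start] > k fires on every index
-- including i == start, so A returns len(arr)+1 groups; B returns len(arr) (each element its own
-- group), the intended count since a group can never exceed the number of elements.
def D_minimumGroups (arr : List Int) (k : Int) : Prop := arr ≠ [] ∧ k < 0
instance (arr : List Int) (k : Int) : Decidable (D_minimumGroups arr k) := by unfold D_minimumGroups; infer_instance

def Spec_minimumGroups (arr : List Int) (k : Int) (out : Int) : Prop := ¬ D_minimumGroups arr k → out = minimumGroups_alt arr k
instance (arr : List Int) (k : Int) (out : Int) : Decidable (Spec_minimumGroups arr k out) := by unfold Spec_minimumGroups; infer_instance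

def pvDiffWitness_minimumGroups : List Int × Int := ([0], -1)
def pvDiffWitnessOut_minimumGroups : Int × Int := (2, 1)

-- ===== CLAIM (what is proved, stated in full; the proofs are below) =====
def Claim_unchanged_minimumGroups : Prop := ∀ (arr : List Int) (k : Int), Dom_minimumGroups arr k → Spec_minimumGroups arr k (minimumGroups arr k)
def Claim_changed_minimumGroups : Prop := Dom_minimumGroups (pvDiffWitness_minimumGroups.1) (pvDiffWitness_minimumGroups.2) ∧ D_minimumGroups (pvDiffWitness_minimumGroups.1) (pvDiffWitness_minimumGroups.2) ∧ minimumGroups (pvDiffWitness_minimumGroups.1) (pvDiffWitness_minimumGroups.2) = pvDiffWitnessOut_minimumGroups.1 ∧ minimumGroups_alt (pvDiffWitness_minimumGroups.1) (pvDiffWitness_minimumGroups.2) = pvDiffWitnessOut_minimumGroups.2 ∧ pvDiffWitnessOut_minimumGroups.1 ≠ pvDiffWitnessOut_minimumGroups.2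
def Claim_exact_minimumGroups : Prop := ∀ (arr : List Int) (k : Int), Dom_minimumGroups arr k → D_minimumGroups arr k → minimumGroups arr k ≠ minimumGroups_alt arr k

-- ===== LEMMAS AND PROOFS =====

-- fuel irrelevance: any fuel ≥ the list length gives the same result
lemma altGroups_fuel (k : Int) : ∀ (m n : Nat) (xs : List Int), xs.length ≤ m → xs.length ≤ n →
    altGroups k m xs = altGroups k n xs := by
  intro m
  induction m with
  | zero =>
      intro n xs hm _
      cases xs with
      | nil => cases n <;> rfl
      | cons a t => simp at hm
  | succ m ih =>
      intro n xs hm hn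
      cases xs with
      | nil => cases n <;> rfl
      | cons a t =>
          cases n with
          | zero => simp at hn
          | succ n =>
              simp only [altGroups]
              congr 1
              exact ih n _ (le_trans (List.length_filter_le _ _) (by simpa using hm))
                (le_trans (List.length_filter_le _ _) (by simpa using hn))

-- B's group count with exact fuel
def G (k : Int) (xs : List Int) : Int := altGroups k xs.length xs

lemma G_cons (k a : Int) (t : List Int) :
    G k (a :: t) = 1 + G k (t.filter (fun x => decide (x - a > k))) := by
  unfold G
  simp only [List.length_cons, altGroups]
  congr 1
  exact altGroups_fuel k t.length _ _ (List.length_filter_le _ _) (le_refl _)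

-- value-level version of A's loop step: carry the anchor VALUE instead of an index
def stepV (k : Int) (q : Int × Int) (x : Int) : Int × Int :=
  if x - q.2 > k then (q.1 + 1, x) else q

-- A's index fold equals the value fold over the mapped elements
lemma fold_idx_val (k : Int) (s : List Int) : ∀ (is : List Nat) (c : Int) (st : Nat),
    (is.map (fun i => s.getD i 0)).foldl (stepV k) (c, s.getD st 0)
    = (((is.foldl (fun (q : Int × Nat) i => if s.getD i 0 - s.getD q.2 0 > k then (q.1 + 1, i) else q) (c, st))).1,
       s.getD ((is.foldl (fun (q : Int × Nat) i => if s.getD i 0 - s.getD q.2 0 > k then (q.1 + 1, i) else q) (c, st))).2 0)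
  | [], c, st => rfl
  | i :: is, c, st => by
      by_cases h : s.getD i 0 - s.getD st 0 > k
      · simp only [List.map_cons, List.foldl_cons, stepV, h, if_pos]
        exact fold_idx_val k s is (c + 1) i
      · simp only [List.map_cons, List.foldl_cons, stepV, h, ite_false]
        exact fold_idx_val k s is c st

lemma map_range_getD (s : List Int) : (List.range s.length).map (fun i => s.getD i 0) = s := by
  apply List.ext_getElem
  · simp
  · intro i h1 h2
    simp [List.getD_eq_getElem?_getD, List.getElem?_eq_getElem h2]

lemma fold_val_groups (k : Int) : ∀ (t : List Int) (a c : Int),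
    t.Pairwise (· ≤ ·) → (∀ x ∈ t, a ≤ x) →
    (t.foldl (stepV k) (c, a)).1 = c + G k (t.filter (fun x => decide (x - a > k)))
  | [], a, c, _, _ => by simp [G, altGroups]
  | x :: t, a, c, hp, hle => by
      have hpt : t.Pairwise (· ≤ ·) := hp.tail
      have hxle : ∀ y ∈ t, x ≤ y := fun y hy => (List.pairwise_cons.mp hp).1 y hy
      have hax : a ≤ x := hle x (List.mem_cons_self)
      by_cases h : x - a > k
      · have hrec := fold_val_groups k t x (c + 1) hpt hxle
        have hff : (t.filter (fun y => decide (y - a > k))).filter (fun y => decide (y - x > k))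
                 = t.filter (fun y => decide (y - x > k)) := by
          rw [List.filter_filter]
          apply List.filter_congr
          intro y _
          by_cases hyx : y - x > k
          · have hya : y - a > k := by omega
            simp [hyx, hya]
          · simp [hyx]
        simp only [List.foldl_cons, stepV, h, if_pos, hrec]
        simp only [List.filter_cons, h, decide_true, if_pos, G_cons, hff]
        ring
      · have hrec := fold_val_groups k t a c hpt (fun y hy => hle y (List.mem_cons_of_mem _ hy))
        simp only [List.foldl_cons, stepV, h, ite_false, hrec, List.filter_cons]
        simp

-- inside D_: every step of A's value fold increments (k < 0)
lemma fold_val_all (k : Int) (hk : k < 0) : ∀ (t : List Int) (a c : Int),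
    (∀ x ∈ t, a ≤ x) → t.Pairwise (· ≤ ·) →
    (t.foldl (stepV k) (c, a)).1 = c + t.length
  | [], a, c, _, _ => by simp
  | x :: t, a, c, hle, hp => by
      have hax : a ≤ x := hle x (List.mem_cons_self)
      have h : x - a > k := by omega
      have hrec := fold_val_all k hk t x (c + 1)
        (fun y hy => (List.pairwise_cons.mp hp).1 y hy) hp.tail
      simp only [List.foldl_cons, stepV, h, if_pos, hrec, List.length_cons]
      omega

-- inside D_: B gives one group per element (k < 0)
lemma G_all (k : Int) (hk : k < 0) : ∀ (s : List Int),
    s.Pairwise (· ≤ ·) → G k s = s.length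
  | [], _ => rfl
  | a :: t, hp => by
      have hfil : t.filter (fun x => decide (x - a > k)) = t := by
        apply List.filter_eq_self.mpr
        intro y hy
        have : a ≤ y := (List.pairwise_cons.mp hp).1 y hy
        simp only [decide_eq_true_eq]
        omega
      rw [G_cons, hfil, G_all k hk t hp.tail]
      simp only [List.length_cons]
      omega

-- A's result via the value fold, for any nonempty sorted list
lemma minimumGroups_eq_fold (arr : List Int) (k : Int) (a : Int) (t : List Int)
    (hs : PySem.List.sorted arr (fun x => x) false = a :: t) :
    minimumGroups arr k = (((a :: t).foldl (stepV k) (1, a))).1 := by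
  unfold minimumGroups
  simp only [hs]
  have h1 := fold_idx_val k (a :: t) (List.range (a :: t).length) 1 0
  have h2 := map_range_getD (a :: t)
  rw [h2] at h1
  simp only [List.length_cons, if_neg (Nat.succ_ne_zero t.length)]
  have h0 : (a :: t).getD 0 0 = a := rfl
  rw [h0] at h1
  exact (congrArg Prod.fst h1).symm

lemma minimumGroups_alt_eq_G (arr : List Int) (k : Int) :
    minimumGroups_alt arr k = G k (PySem.List.sorted arr (fun x => x) false) := rfl

lemma sorted_pairwise_le (arr : List Int) :
    (PySem.List.sorted arr (fun x : Int => x) false).Pairwise (· ≤ ·) :=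
  PySem.List.sorted_pairwise arr (fun x : Int => x)

-- ===== VERDICT (by name: the statement is the Claim_ definition above) =====
theorem minimumGroups_spec : Claim_unchanged_minimumGroups := by
  intro arr k _ hnd
  have hnd' : arr = [] ∨ 0 ≤ k := by
    unfold D_minimumGroups at hnd
    by_cases h : arr = []
    · exact Or.inl h
    · right; by_contra hk; exact hnd ⟨h, by omega⟩
  rcases hnd' with h | hk
  · subst h; rfl
  · rcases hs : PySem.List.sorted arr (fun x => x) false with _ | ⟨a, t⟩
    · have : arr = [] := (PySem.List.sorted_eq_nil_iff arr (fun x => x) false).mp hs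
      subst this; rfl
    · have hp : (a :: t).Pairwise (· ≤ ·) := by
        have := sorted_pairwise_le arr
        rw [hs] at this; exact this
      rw [minimumGroups_eq_fold arr k a t hs, minimumGroups_alt_eq_G, hs, G_cons]
      have hstep : stepV k (1, a) a = (1, a) := by
        unfold stepV
        rw [if_neg (by omega)]
      rw [List.foldl_cons, hstep,
        fold_val_groups k t a 1 hp.tail (fun y hy => (List.pairwise_cons.mp hp).1 y hy)]

theorem minimumGroups_changed : Claim_changed_minimumGroups := by
  unfold Claim_changed_minimumGroups; decide

theorem minimumGroups_tight : Claim_exact_minimumGroups := by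
  intro arr k _ hd
  obtain ⟨hne, hk⟩ := hd
  rcases hs : PySem.List.sorted arr (fun x => x) false with _ | ⟨a, t⟩
  · exact absurd ((PySem.List.sorted_eq_nil_iff arr (fun x => x) false).mp hs) hne
  · have hp : (a :: t).Pairwise (· ≤ ·) := by
      have := sorted_pairwise_le arr
      rw [hs] at this; exact this
    have hle : ∀ y ∈ a :: t, a ≤ y := by
      intro y hy
      rcases List.mem_cons.mp hy with h | h
      · omega
      · exact (List.pairwise_cons.mp hp).1 y h
    rw [minimumGroups_eq_fold arr k a t hs, minimumGroups_alt_eq_G, hs,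
      fold_val_all k hk (a :: t) a 1 hle hp, G_all k hk (a :: t) hp]
    simp only [List.length_cons]
    omega
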